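-- pv_equiv track=rewrite | github.com/rwth-i6/returnn | returnn/tf/util/data.py | _default_time_dim_axis
-- ===== SOURCE A (Python) =====
-- def _batch_shape_from_shape(shape, batch_dim_axis):
--   """
--   :param tuple[int|None]|list[int|None] shape: without batch-dim
--   :param int|None batch_dim_axis:
--   :return: shape with batch dim if existing
--   :rtype: tuple[int|None]
--   """
--   shape = tuple(shape)
--   if batch_dim_axis is not None:
--     assert 0 <= batch_dim_axis <= len(shape)
--     return shape[:batch_dim_axis] + (None,) + shape[batch_dim_axis:]
--   else:
--     return shape
--
-- def _default_time_dim_axis(batch_dim_axis, shape):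
--   """
--   :param int|None batch_dim_axis:
--   :param tuple[int|None]|list[int|None] shape: without batch-dim
--   :return: time dim axis, counted with batch-dim
--   :rtype: int|None
--   """
--   if batch_dim_axis is None:
--     time_dim_axis = None
--   else:
--     # Do not select the batch dim axis, or any axis with None dim.
--     # Note that we currently allow to select the same as the feature dim axis,
--     # in case the feature dim is None.
--     taken_axes = {batch_dim_axis}
--     batch_shape = _batch_shape_from_shape(shape, batch_dim_axis=batch_dim_axis)
--     for axis, _dim in enumerate(batch_shape):
--       if _dim is not None:
--         taken_axes.add(axis)
--     available_axes = [i for i in range(len(batch_shape)) if i not in taken_axes]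
--     if available_axes:
--       time_dim_axis = available_axes[0]
--     else:
--       time_dim_axis = None
--   return time_dim_axis
-- ===== SOURCE B (Python) =====
-- def _default_time_dim_axis(batch_dim_axis, shape):
--   """
--   :param int|None batch_dim_axis:
--   :param tuple[int|None]|list[int|None] shape: without batch-dim
--   :return: time dim axis, counted with batch-dim
--   :rtype: int|None
--   """
--   if batch_dim_axis is None:
--     return None
--   assert 0 <= batch_dim_axis <= len(shape)
--   # First dim of the original shape that is None becomes the time dim;
--   # shift its index into batch coordinates (the batch dim is inserted at batch_dim_axis).
--   for i, dim in enumerate(shape):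
--     if dim is None:
--       return i if i < batch_dim_axis else i + 1
--   return None
-- ===== Notes on version B (the rewrite author's own statement) =====
-- stated objective: simpler
-- what changed: Instead of building the batch-inserted shape, a taken-axes set and an available-axes list, B scans the original shape once, returns at the first None dim with its index shifted past the batch axis; Pre_ excludes batch_dim_axis outside [0, len(shape)], where both A and B raise AssertionError.
import Mathlib
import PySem

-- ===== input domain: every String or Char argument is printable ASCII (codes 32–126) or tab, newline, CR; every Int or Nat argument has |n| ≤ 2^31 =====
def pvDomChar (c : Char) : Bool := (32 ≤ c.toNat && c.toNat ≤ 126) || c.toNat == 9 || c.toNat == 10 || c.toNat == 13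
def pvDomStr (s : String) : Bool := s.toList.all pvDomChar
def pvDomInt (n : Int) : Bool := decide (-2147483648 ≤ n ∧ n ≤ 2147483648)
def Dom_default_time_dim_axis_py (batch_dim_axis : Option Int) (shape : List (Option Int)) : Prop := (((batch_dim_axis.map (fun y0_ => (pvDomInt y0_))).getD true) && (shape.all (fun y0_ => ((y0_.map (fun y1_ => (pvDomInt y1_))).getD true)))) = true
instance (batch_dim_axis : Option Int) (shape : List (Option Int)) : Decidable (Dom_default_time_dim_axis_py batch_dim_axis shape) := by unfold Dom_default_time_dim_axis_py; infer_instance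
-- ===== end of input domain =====

-- B replaces A's batch-shape construction + taken-axes set + available-axes list by a single scan of the
-- original shape for the first None dim, shifting its index past the batch axis (simpler, same cost).
-- Both A and B raise AssertionError for batch_dim_axis outside [0, len(shape)]; Pre_ excludes exactly those inputs.

-- ===== PORT A =====
-- _batch_shape_from_shape(shape, batch_dim_axis) for batch_dim_axis not None;
-- its `assert 0 <= batch_dim_axis <= len(shape)` raises exactly outside Pre_ (those inputs are excluded).
def batch_shape_from_shape_py (shape : List (Option Int)) (b : Int) : List (Option Int) :=
  PySem.List.slice shape none (some b) ++ [none] ++ PySem.List.slice shape (some b) none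

def default_time_dim_axis_py (batch_dim_axis : Option Int) (shape : List (Option Int)) : Option Int :=
  match batch_dim_axis with
  | none => none
  | some b =>
    let taken0 : PySem.Set Int := PySem.Set.ofList [b]
    let batch_shape := batch_shape_from_shape_py shape b
    let taken := (PySem.List.enumerate batch_shape 0).foldl
      (fun s p => if p.2.isSome then PySem.Set.add s p.1 else s) taken0
    let available := (PySem.List.pyRange 0 (batch_shape.length : Int) 1).filter
      (fun i => !(PySem.Set.contains taken i))
    available.head?

-- ===== PORT B =====
-- B's for-loop over enumerate(shape), returning at the first None dim (index shifted past the batch axis)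
def default_time_dim_axis_py_altLoop (b : Int) (i : Int) : List (Option Int) → Option Int
  | [] => none
  | none :: _ => some (if i < b then i else i + 1)
  | some _ :: rest => default_time_dim_axis_py_altLoop b (i + 1) rest

def default_time_dim_axis_py_alt (batch_dim_axis : Option Int) (shape : List (Option Int)) : Option Int :=
  match batch_dim_axis with
  | none => none
  | some b => default_time_dim_axis_py_altLoop b 0 shape

-- ===== PRECONDITION & SPEC =====
-- Pre_ excludes exactly the inputs where A's `assert 0 <= batch_dim_axis <= len(shape)` raises
-- AssertionError (B's identical assert raises there too).
def Pre_default_time_dim_axis_py (batch_dim_axis : Option Int) (shape : List (Option Int)) : Prop :=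
  ∀ b : Int, batch_dim_axis = some b → 0 ≤ b ∧ b ≤ (shape.length : Int)
instance (batch_dim_axis : Option Int) (shape : List (Option Int)) : Decidable (Pre_default_time_dim_axis_py batch_dim_axis shape) := by unfold Pre_default_time_dim_axis_py; infer_instance

def pvWitness_default_time_dim_axis_py : Option Int × List (Option Int) := (some 0, [some 3, none, some 4])

def Spec_default_time_dim_axis_py (batch_dim_axis : Option Int) (shape : List (Option Int)) (out : Option Int) : Prop := out = default_time_dim_axis_py_alt batch_dim_axis shape
instance (batch_dim_axis : Option Int) (shape : List (Option Int)) (out : Option Int) : Decidable (Spec_default_time_dim_axis_py batch_dim_axis shape out) := by unfold Spec_default_time_dim_axis_py; infer_instance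

-- ===== CLAIM (what is proved, stated in full; the proofs are below) =====
def Claim_equal_default_time_dim_axis_py : Prop := ∀ (batch_dim_axis : Option Int) (shape : List (Option Int)), Dom_default_time_dim_axis_py batch_dim_axis shape → Pre_default_time_dim_axis_py batch_dim_axis shape → Spec_default_time_dim_axis_py batch_dim_axis shape (default_time_dim_axis_py batch_dim_axis shape)

-- ===== LEMMAS AND PROOFS =====

-- the batch-inserted shape, at the Nat level
def pvBShape (shape : List (Option Int)) (β : Nat) : List (Option Int) :=
  shape.take β ++ none :: shape.drop β

-- A's scan for the first available axis, reduced to a Nat-level find? over the index range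
def pvF (shape : List (Option Int)) (β : Nat) : Option Nat :=
  (List.range (shape.length + 1)).find?
    (fun k => (!(k == β)) && ((pvBShape shape β)[k]? == some none))

-- membership in the taken-axes set A folds up over enumerate(batch_shape)
theorem pv_mem_taken_foldl (xs : List (Option Int)) :
    ∀ (s0 : PySem.Set Int) (st i : Int),
    (i ∈ (PySem.List.enumerate xs st).foldl
        (fun s p => if p.2.isSome then PySem.Set.add s p.1 else s) s0) ↔
    (i ∈ s0 ∨ ∃ k : Nat, ∃ _ : k < xs.length, i = st + k ∧ (xs[k]).isSome) := by
  induction xs with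
  | nil => intro s0 st i; simp [PySem.List.enumerate_nil]
  | cons x rest ih =>
    intro s0 st i
    rw [PySem.List.enumerate_cons, List.foldl_cons]
    by_cases hx : x.isSome
    · simp only [hx, if_pos]
      rw [ih]
      constructor
      · rintro (h | ⟨k, hk, rfl, hs⟩)
        · rw [PySem.Set.mem_add] at h
          rcases h with h | rfl
          · exact Or.inl h
          · exact Or.inr ⟨0, by simp, by simp, by simpa using hx⟩
        · exact Or.inr ⟨k + 1, by simpa using hk, by push_cast; ring, by simpa using hs⟩
      · rintro (h | ⟨k, hk, rfl, hs⟩)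
        · exact Or.inl ((PySem.Set.mem_add s0 st i).mpr (Or.inl h))
        · cases k with
          | zero => exact Or.inl ((PySem.Set.mem_add s0 st (st + 0)).mpr (Or.inr (by simp)))
          | succ k =>
            refine Or.inr ⟨k, by simpa using hk, by push_cast; ring, by simpa using hs⟩
    · simp only [hx, Bool.false_eq_true, if_neg, not_false_iff]
      rw [ih]
      constructor
      · rintro (h | ⟨k, hk, rfl, hs⟩)
        · exact Or.inl h
        · exact Or.inr ⟨k + 1, by simpa using hk, by push_cast; ring, by simpa using hs⟩
      · rintro (h | ⟨k, hk, rfl, hs⟩)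
        · exact Or.inl h
        · cases k with
          | zero => exact absurd (by simpa using hs) (by simpa using hx)
          | succ k =>
            refine Or.inr ⟨k, by simpa using hk, by push_cast; ring, by simpa using hs⟩

-- A's body, for some b with 0 ≤ b ≤ len(shape), equals pvF at the Nat level
theorem pvA_eq_F (shape : List (Option Int)) (b : Int) (hb0 : 0 ≤ b)
    (_hb1 : b ≤ (shape.length : Int)) :
    default_time_dim_axis_py (some b) shape = (pvF shape b.toNat).map (fun j : Nat => (j : Int)) := by
  have hbs : batch_shape_from_shape_py shape b = pvBShape shape b.toNat := by
    simp [batch_shape_from_shape_py, pvBShape, PySem.List.slice_to shape hb0,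
      PySem.List.slice_from shape hb0]
  have hlen : (pvBShape shape b.toNat).length = shape.length + 1 := by
    simp [pvBShape]
  show ((PySem.List.pyRange 0 ((batch_shape_from_shape_py shape b).length : Int) 1).filter _).head? = _
  rw [List.head?_filter, hbs, hlen, PySem.List.pyRange_one]
  simp only [zero_add, List.find?_map, Int.sub_zero]
  rw [Int.toNat_natCast]
  congr 1
  unfold pvF
  rw [← List.head?_filter, ← List.head?_filter]
  congr 1
  apply List.filter_congr
  intro k hk
  rw [List.mem_range] at hk
  simp only [Function.comp]
  rw [Bool.eq_iff_iff]
  rw [Bool.not_eq_true', ← Bool.not_eq_true]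
  rw [show ((List.foldl (fun s p => if p.2.isSome = true then s.add p.1 else s) (PySem.Set.ofList [b])
        (PySem.List.enumerate (pvBShape shape b.toNat))).contains (k : Int) = true) ↔
      ((k : Int) ∈ (List.foldl (fun s p => if p.2.isSome = true then s.add p.1 else s) (PySem.Set.ofList [b])
        (PySem.List.enumerate (pvBShape shape b.toNat)))) from PySem.Set.contains_iff _ _]
  rw [pv_mem_taken_foldl]
  rw [PySem.Set.mem_ofList]
  have hklen : k < (pvBShape shape b.toNat).length := by omega
  rw [List.getElem?_eq_getElem hklen]
  constructor
  · intro h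
    rw [not_or] at h
    obtain ⟨h1, h2⟩ := h
    simp only [List.mem_singleton] at h1
    have hkb : (k == b.toNat) = false := by
      simp only [beq_eq_false_iff_ne, ne_eq]
      intro hkk; subst hkk; exact h1 (by omega)
    have hnone : (pvBShape shape b.toNat)[k] = none := by
      by_contra hne
      exact h2 ⟨k, by omega, by simp, by simpa [Option.isSome_iff_ne_none] using hne⟩
    simp [hkb, hnone]
  · intro h
    simp only [Bool.and_eq_true, Bool.not_eq_true', beq_eq_false_iff_ne, ne_eq, beq_iff_eq,
      Option.some.injEq] at h
    obtain ⟨h1, h2⟩ := h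
    rw [not_or]
    refine ⟨?_, ?_⟩
    · simp only [List.mem_singleton]
      intro hkb; apply h1; omega
    · rintro ⟨k', hk', hkk', hs⟩
      have : k' = k := by omega
      subst this
      rw [h2] at hs
      simp at hs

-- find? over the index range of a list, for a pure lookup predicate, is findIdx?
theorem pvG (l : List (Option Int)) :
    (List.range l.length).find? (fun k => l[k]? == some none) = l.findIdx? Option.isNone := by
  induction l with
  | nil => rfl
  | cons x rest ih =>
    rw [show (x :: rest).length = rest.length + 1 from rfl, List.range_succ_eq_map,
      List.find?_cons, List.findIdx?_cons]
    cases x with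
    | none => rfl
    | some v =>
      simp only [List.getElem?_cons_zero]
      rw [show ((some (some v) : Option (Option Int)) == some none) = false from rfl]
      simp only [Option.isNone_some, List.find?_map]
      rw [← ih]
      congr 1

-- pvF is 'first None dim of the original shape, index shifted past β'
theorem pvF_eq (shape : List (Option Int)) : ∀ (β : Nat), β ≤ shape.length →
    pvF shape β = (shape.findIdx? Option.isNone).map (fun j => if j < β then j else j + 1) := by
  induction shape with
  | nil =>
    intro β hβ
    have hb : β = 0 := Nat.le_zero.mp hβ
    subst hb; decide
  | cons d rest ih =>
    intro β hβ
    cases β with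
    | zero =>
      unfold pvF
      rw [show (d :: rest).length = rest.length + 1 from rfl, List.range_succ_eq_map,
        List.find?_cons]
      rw [show ((!(0 == 0)) && ((pvBShape (d :: rest) 0)[0]? == some none)) = false from rfl]
      simp only [cond_false, List.find?_map]
      have hpred : (fun k : Nat => ((!(k.succ == 0)) && ((pvBShape (d :: rest) 0)[k.succ]? == some none)))
          = (fun k : Nat => ((d :: rest)[k]? == some none)) := by
        funext k; simp [pvBShape]
      rw [show ((fun k => !(k == 0) && ((pvBShape (d :: rest) 0)[k]? == some none)) ∘ Nat.succ)
            = (fun k : Nat => ((d :: rest)[k]? == some none)) from hpred]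
      rw [show rest.length + 1 = (d :: rest).length from rfl, pvG]
      cases (d :: rest).findIdx? Option.isNone <;> simp
    | succ β' =>
      have hβ' : β' ≤ rest.length := by simpa using hβ
      have hbs : pvBShape (d :: rest) (β' + 1) = d :: pvBShape rest β' := by
        simp [pvBShape]
      unfold pvF
      rw [show (d :: rest).length = rest.length + 1 from rfl, List.range_succ_eq_map,
        List.find?_cons, hbs]
      cases d with
      | none =>
        rw [show ((!(0 == β' + 1)) && ((none :: pvBShape rest β')[0]? == some (none : Option Int))) = true from rfl]
        simp [List.findIdx?_cons]
      | some v =>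
        rw [show ((!(0 == β' + 1)) && ((some v :: pvBShape rest β')[0]? == some (none : Option Int))) = false from rfl]
        simp only [cond_false, List.find?_map]
        have hpred : ((fun k => !(k == β' + 1) && ((some v :: pvBShape rest β')[k]? == some none)) ∘ Nat.succ)
            = (fun k : Nat => (!(k == β')) && ((pvBShape rest β')[k]? == some none)) := by
          funext k
          simp only [Function.comp]
          congr 1 <;> simp
        rw [hpred]
        rw [show (List.range (rest.length + 1)).find? (fun k => (!(k == β')) && ((pvBShape rest β')[k]? == some none)) = pvF rest β' from rfl]
        rw [ih β' hβ', List.findIdx?_cons]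
        rw [show (Option.isNone (some v)) = false from rfl]
        simp only [Bool.false_eq_true, if_false, cond_false, Option.map_map]
        cases rest.findIdx? Option.isNone with
        | none => simp
        | some j =>
          simp only [Option.map_some, Option.some.injEq, Function.comp]
          split_ifs <;> omega

-- B's loop is the same first-None find, at any start index
theorem pvAlt_eq (shape : List (Option Int)) : ∀ (b i : Int),
    default_time_dim_axis_py_altLoop b i shape =
      (shape.findIdx? Option.isNone).map
        (fun j : Nat => if i + j < b then i + (j : Int) else i + j + 1) := by
  induction shape with
  | nil => intro b i; simp [default_time_dim_axis_py_altLoop]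
  | cons d rest ih =>
    intro b i
    cases d with
    | none => simp [default_time_dim_axis_py_altLoop, List.findIdx?_cons]
    | some v =>
      rw [show default_time_dim_axis_py_altLoop b i (some v :: rest)
            = default_time_dim_axis_py_altLoop b (i + 1) rest from rfl, ih,
        List.findIdx?_cons]
      simp only [Option.isNone_some, cond_false, Option.map_map]
      cases h : rest.findIdx? Option.isNone with
      | none => simp
      | some j =>
        simp only [Option.map_some]
        congr 1
        push_cast
        split_ifs <;> omega

-- ===== VERDICT (by name: the statement is the Claim_ definition above) =====
theorem default_time_dim_axis_py_spec : Claim_equal_default_time_dim_axis_py := by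
  intro bda shape _hd hpre
  unfold Spec_default_time_dim_axis_py
  cases bda with
  | none => rfl
  | some b =>
    obtain ⟨hb0, hb1⟩ := hpre b rfl
    rw [pvA_eq_F shape b hb0 hb1, pvF_eq shape b.toNat (by omega)]
    show _ = default_time_dim_axis_py_altLoop b 0 shape
    rw [pvAlt_eq]
    cases shape.findIdx? Option.isNone with
    | none => simp
    | some j =>
      simp only [Option.map_map, Option.map_some, Option.some.injEq]
      split_ifs <;> push_cast <;> omega
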